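-- pv_equiv track=rewrite | github.com/edgarWolf/lecture-cryptography | Übungen/Übung1/vig.py | get_char_distributions_for_given_key_length
-- ===== SOURCE A (Python) =====
-- def get_char_distributions_for_given_key_length(text:str, key_length:str):
--     char_dists = []
--     text_length = len(text)
--     char_counts = int(text_length / key_length)
--     for i in range(key_length):
--         char_dist = {}
--         for j in range(char_counts):
--             index = i + j * key_length
--
--             if index >= text_length:
--                 break
--
--             letter = text[index]
--             if letter not in char_dist:
--                 char_dist[letter] = 1
--             else:
--                 char_dist[letter] +=1
--
--         char_dists.append(dict(sorted(char_dist.items(), key=lambda item: item[1])))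
--     return char_dists
-- ===== SOURCE B (Python) =====
-- def get_char_distributions_for_given_key_length(text: str, key_length: str):
--     text_length = len(text)
--     char_counts = int(text_length / key_length)
--     char_dists = [{} for _ in range(key_length)]
--     for idx in range(key_length * char_counts):
--         d = char_dists[idx % key_length]
--         ch = text[idx]
--         d[ch] = d.get(ch, 0) + 1
--     return [dict(sorted(d.items(), key=lambda item: item[1])) for d in char_dists]
-- ===== Notes on version B (the rewrite author's own statement) =====
-- stated objective: alternative
-- what changed: A's nested loops (outer over key offsets, inner striding through the text) are replaced by one flat pass over the counted prefix that distributes each character to its offset's dict via idx % key_length, followed by the same per-dict count sort.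
-- outside the precondition, e.g. on get_char_distributions_for_given_key_length('ab', -1): A returns [], B raises IndexError
import Mathlib
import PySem

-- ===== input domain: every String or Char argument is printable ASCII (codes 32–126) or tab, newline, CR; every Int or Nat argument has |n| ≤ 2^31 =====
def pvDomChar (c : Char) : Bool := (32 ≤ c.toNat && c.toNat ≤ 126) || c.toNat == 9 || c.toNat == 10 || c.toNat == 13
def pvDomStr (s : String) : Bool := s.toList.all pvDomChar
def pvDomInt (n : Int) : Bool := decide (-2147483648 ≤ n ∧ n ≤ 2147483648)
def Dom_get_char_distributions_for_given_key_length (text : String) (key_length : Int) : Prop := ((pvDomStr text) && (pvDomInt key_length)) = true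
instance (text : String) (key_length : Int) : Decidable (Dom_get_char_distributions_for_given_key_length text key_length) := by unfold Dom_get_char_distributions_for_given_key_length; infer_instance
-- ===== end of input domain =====

-- B replaces A's nested offset/stride loops by one flat modulo-distributing pass over the
-- counted prefix (an alternative decomposition of the same grouping, same asymptotic cost).

-- ===== PORT A =====
-- step of A's 'if letter not in char_dist: … else: …' branch
def pvStepA (d : PySem.Dict String Int) (ch : String) : PySem.Dict String Int :=
  match d.get? ch with
  | none => d.insert ch 1
  | some v => d.insert ch (v + 1)

-- A's inner 'for j in range(char_counts)' loop with its 'break' on index >= text_length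
def pvInnerA (s : List Char) (n k i : Int) (js : List Int) (d : PySem.Dict String Int) :
    PySem.Dict String Int :=
  match js with
  | [] => d
  | j :: rest =>
    let index := i + j * k
    if index ≥ n then d
    else
      match PySem.List.pyGet? s index with
      | none => d            -- unreachable: guarded by index < n and index ≥ 0 whenever reached
      | some ch => pvInnerA s n k i rest (pvStepA d (String.ofList [ch]))

-- int(text_length / key_length): Python truncates the float quotient toward zero; for
-- text_length ≥ 0 (< 2^53) that coincides with Lean's Int euclidean '/', used here.
-- dict(sorted(d.items(), …)) over unique keys is the sorted item list itself.
def get_char_distributions_for_given_key_length (text : String) (key_length : Int) :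
    List (List (String × Int)) :=
  let s := text.toList
  let text_length : Int := s.length
  let char_counts : Int := text_length / key_length
  (PySem.List.pyRange 0 key_length 1).map (fun i =>
    PySem.List.sorted
      (pvInnerA s text_length key_length i (PySem.List.pyRange 0 char_counts 1)
        PySem.Dict.empty).items
      (fun item => item.2) false)

-- ===== PORT B =====
-- B's 'd[ch] = d.get(ch, 0) + 1'
def pvStepB (d : PySem.Dict String Int) (ch : String) : PySem.Dict String Int :=
  d.insert ch (d.getD ch 0 + 1)

-- B's single flat 'for idx in range(key_length * char_counts)' pass
def pvFlatB (s : List Char) (k : Int) (idxs : List Int) (ds : List (PySem.Dict String Int)) :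
    List (PySem.Dict String Int) :=
  match idxs with
  | [] => ds
  | idx :: rest =>
    let off := (PySem.Int.mod idx k).toNat   -- idx % key_length; in [0, k) under Pre_ (k > 0)
    match PySem.List.pyGet? s idx with
    | none => pvFlatB s k rest ds            -- IndexError in Python; unreachable under Pre_
    | some ch => pvFlatB s k rest (ds.modify off (fun d => pvStepB d (String.ofList [ch])))

def get_char_distributions_for_given_key_length_alt (text : String) (key_length : Int) :
    List (List (String × Int)) :=
  let s := text.toList
  let text_length : Int := s.length
  let char_counts : Int := text_length / key_length
  let ds0 := (PySem.List.pyRange 0 key_length 1).map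
    (fun _ => (PySem.Dict.empty : PySem.Dict String Int))
  let ds := pvFlatB s key_length (PySem.List.pyRange 0 (key_length * char_counts) 1) ds0
  ds.map (fun d => PySem.List.sorted d.items (fun item => item.2) false)

-- ===== PRECONDITION & SPEC =====
-- Pre_ excludes key_length = 0, where A raises ZeroDivisionError, and negative key_length with
-- len(text) ≥ -key_length, where A's [] is an accident of an empty range(key_length) that B's
-- flat pass does not reproduce (B raises IndexError there).
def Pre_get_char_distributions_for_given_key_length (text : String) (key_length : Int) : Prop :=
  0 < key_length ∨ (key_length < 0 ∧ (text.length : Int) < -key_length)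
instance (text : String) (key_length : Int) : Decidable (Pre_get_char_distributions_for_given_key_length text key_length) := by unfold Pre_get_char_distributions_for_given_key_length; infer_instance

def pvWitness_get_char_distributions_for_given_key_length : String × Int := ("attackatdawn", 3)

def Spec_get_char_distributions_for_given_key_length (text : String) (key_length : Int) (out : List (List (String × Int))) : Prop := out = get_char_distributions_for_given_key_length_alt text key_length
instance (text : String) (key_length : Int) (out : List (List (String × Int))) : Decidable (Spec_get_char_distributions_for_given_key_length text key_length out) := by unfold Spec_get_char_distributions_for_given_key_length; infer_instance

-- ===== CLAIM (what is proved, stated in full; the proofs are below) =====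
def Claim_equal_get_char_distributions_for_given_key_length : Prop := ∀ (text : String) (key_length : Int), Dom_get_char_distributions_for_given_key_length text key_length → Pre_get_char_distributions_for_given_key_length text key_length → Spec_get_char_distributions_for_given_key_length text key_length (get_char_distributions_for_given_key_length text key_length)

-- ===== LEMMAS AND PROOFS =====

-- the per-offset reference count: chars at positions i, i+k', …, i+(t-1)k'
def pvRef (s : List Char) (k' t i : Nat) : PySem.Dict String Int :=
  (List.range t).foldl (fun d m => pvStepB d (String.ofList [s.getD (i + m * k') ' '])) PySem.Dict.empty

theorem pvStepA_eq (d : PySem.Dict String Int) (ch : String) :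
    pvStepA d ch = pvStepB d ch := by
  unfold pvStepA pvStepB
  cases h : d.get? ch <;> simp [PySem.Dict.getD, h]

theorem pvFlatB_length (s : List Char) (k : Int) (idxs : List Int)
    (ds : List (PySem.Dict String Int)) : (pvFlatB s k idxs ds).length = ds.length := by
  induction idxs generalizing ds with
  | nil => rfl
  | cons idx rest ih =>
    unfold pvFlatB
    cases PySem.List.pyGet? s idx <;> simp [ih]

theorem pvFlatB_nil (s : List Char) (k : Int) (idxs : List Int) :
    pvFlatB s k idxs [] = [] := by
  induction idxs with
  | nil => rfl
  | cons idx rest ih =>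
    unfold pvFlatB
    cases PySem.List.pyGet? s idx <;> simp [ih]

theorem pvFlatB_append (s : List Char) (k : Int) (xs ys : List Int)
    (ds : List (PySem.Dict String Int)) :
    pvFlatB s k (xs ++ ys) ds = pvFlatB s k ys (pvFlatB s k xs ds) := by
  induction xs generalizing ds with
  | nil => rfl
  | cons x xs ih =>
    rw [List.cons_append]
    cases h : PySem.List.pyGet? s x <;> simp [pvFlatB, h, ih]

theorem pvInnerA_foldl (s : List Char) (k i : Int) (hk : 0 < k) (hi0 : 0 ≤ i) (hik : i < k)
    (c : Int) (hkc : k * c ≤ (s.length : Int)) :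
    ∀ (a : Int) (d : PySem.Dict String Int), 0 ≤ a →
      pvInnerA s (s.length : Int) k i (PySem.List.pyRange a c 1) d
        = (PySem.List.pyRange a c 1).foldl
            (fun d j => pvStepB d (String.ofList [s.getD (i + j * k).toNat ' '])) d := by
  intro a d ha
  generalize hfa : (c - a).toNat = fuel
  induction fuel generalizing a d with
  | zero =>
    have hca : c ≤ a := by omega
    rw [PySem.List.pyRange_one_eq_nil hca]
    rfl
  | succ fuel ih =>
    have hac : a < c := by omega
    rw [PySem.List.pyRange_one_cons hac]
    have hak : a * k ≤ (c - 1) * k := by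
      have := mul_le_mul_of_nonneg_right (by omega : a ≤ c - 1) hk.le
      linarith
    have hidxn : i + a * k < (s.length : Int) := by nlinarith
    have hidx0 : (0 : Int) ≤ i + a * k := by
      have := mul_nonneg ha hk.le
      omega
    show (if i + a * k ≥ (s.length : Int) then d else _) = _
    rw [if_neg (not_le.mpr hidxn)]
    rw [PySem.List.pyGet?_eq_some_getElem s hidx0 (by simpa using hidxn)]
    show pvInnerA s (s.length : Int) k i (PySem.List.pyRange (a + 1) c 1)
        (pvStepA d (String.ofList [s[(i + a * k).toNat]])) = _
    rw [List.foldl_cons, pvStepA_eq,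
      show s[(i + a * k).toNat]'(by omega) = s.getD (i + a * k).toNat ' ' from
        (List.getD_eq_getElem s ' ' (by omega)).symm]
    exact ih (a + 1) _ (by omega) (by omega)

theorem pvA_ref (s : List Char) (k : Int) (hk : 0 < k) (i' : Nat) (hi : i' < k.toNat) :
    pvInnerA s (s.length : Int) k (i' : Int)
        (PySem.List.pyRange 0 ((s.length : Int) / k) 1) PySem.Dict.empty
      = pvRef s k.toNat ((s.length : Int) / k).toNat i' := by
  have hkn : ((k.toNat : Int)) = k := Int.toNat_of_nonneg hk.le
  have hc0 : 0 ≤ (s.length : Int) / k := Int.ediv_nonneg (by positivity) hk.le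
  have hkc : k * ((s.length : Int) / k) ≤ (s.length : Int) := by
    have h1 := Int.ediv_add_emod (s.length : Int) k
    have h2 := Int.emod_nonneg (s.length : Int) (ne_of_gt hk)
    linarith
  rw [pvInnerA_foldl s k (i' : Int) hk (by positivity) (by omega) _ hkc 0 _ le_rfl]
  rw [PySem.List.pyRange_one 0 _, List.foldl_map]
  unfold pvRef
  have hfun : (fun (d : PySem.Dict String Int) (m : Nat) =>
        pvStepB d (String.ofList [s.getD ((i' : Int) + (0 + (m : Int)) * k).toNat ' ']))
      = (fun d m => pvStepB d (String.ofList [s.getD (i' + m * k.toNat) ' '])) := by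
    funext d m
    have : ((i' : Int) + (0 + (m : Int)) * k) = ((i' + m * k.toNat : Nat) : Int) := by
      push_cast [hkn]; ring
    rw [this, Int.toNat_natCast]
  rw [hfun]
  simp

theorem pvFlatB_round (s : List Char) (k : Int) (hk : 0 < k) (t : Nat)
    (ht : k * (t + 1) ≤ (s.length : Int)) :
    ∀ (i0 : Nat), i0 ≤ k.toNat → ∀ (ds : List (PySem.Dict String Int)) (hlen : ds.length = k.toNat)
      (i : Nat) (hi : i < k.toNat),
      (pvFlatB s k (PySem.List.pyRange (k * t + i0) (k * t + k) 1) ds)[i]'(by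
        rw [pvFlatB_length]; omega)
        = if i0 ≤ i then pvStepB (ds[i]'(by omega)) (String.ofList [s.getD (i + t * k.toNat) ' '])
          else ds[i]'(by omega) := by
  have hkn : ((k.toNat : Int)) = k := Int.toNat_of_nonneg hk.le
  intro i0 hi0 ds hlen i hi
  generalize hf : k.toNat - i0 = fuel
  induction fuel generalizing i0 ds with
  | zero =>
    have hi0' : i0 = k.toNat := by omega
    rw [PySem.List.pyRange_one_eq_nil (by omega)]
    have : ¬ i0 ≤ i := by omega
    simp [pvFlatB, this]
  | succ fuel ih =>
    have hi0k : i0 < k.toNat := by omega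
    have hkt0 : (0 : Int) ≤ k * t := mul_nonneg hk.le (by positivity)
    have hidx0 : (0 : Int) ≤ k * t + i0 := by omega
    have hidxn : k * (t : Int) + (i0 : Int) < (s.length : Int) := by
      have : k * ((t : Int) + 1) = k * t + k := by ring
      omega
    have hmod : (PySem.Int.mod (k * (t : Int) + (i0 : Int)) k).toNat = i0 := by
      rw [PySem.Int.mod_eq_emod_of_pos hk,
        show k * (t : Int) + (i0 : Int) = (i0 : Int) + k * (t : Int) by ring,
        Int.add_mul_emod_self_left, Int.emod_eq_of_lt (by omega) (by omega)]
      omega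
    have hidxNat : (k * (t : Int) + (i0 : Int)).toNat = i0 + t * k.toNat := by
      rw [show k * (t : Int) + (i0 : Int) = ((i0 + t * k.toNat : Nat) : Int) by push_cast [hkn]; ring,
        Int.toNat_natCast]
    have hcons : pvFlatB s k (PySem.List.pyRange (k * (t : Int) + (i0 : Int)) (k * t + k) 1) ds
        = pvFlatB s k (PySem.List.pyRange (k * (t : Int) + ((i0 + 1 : Nat) : Int)) (k * t + k) 1)
            (ds.modify i0 (fun d => pvStepB d (String.ofList [s.getD (i0 + t * k.toNat) ' ']))) := by
      rw [PySem.List.pyRange_one_cons (by omega)]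
      have hget : PySem.List.pyGet? s (k * (t : Int) + (i0 : Int))
          = some (s.getD (i0 + t * k.toNat) ' ') := by
        rw [PySem.List.pyGet?_eq_some_getElem s hidx0 (by simpa using hidxn)]
        simp only [hidxNat]
        rw [List.getD_eq_getElem s ' ' (by omega)]
      have hr : k * (t : Int) + (i0 : Int) + 1 = k * (t : Int) + ((i0 + 1 : Nat) : Int) := by
        push_cast; ring
      simp only [pvFlatB, hget, hmod, hr]
    rw [List.getElem_of_eq hcons]
    rw [ih (i0 + 1) (by omega) _ (by simpa using hlen) (by omega)]
    rw [List.getElem_modify]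
    by_cases hii : i = i0
    · subst hii
      simp [show ¬ i + 1 ≤ i by omega]
    · by_cases hlt : i0 ≤ i
      · have h1 : i0 + 1 ≤ i := by omega
        simp [h1, Ne.symm hii, hlt]
      · have h1 : ¬ i0 + 1 ≤ i := by omega
        simp [h1, Ne.symm hii, hlt]

theorem pvFlatB_full (s : List Char) (k : Int) (hk : 0 < k) (t : Nat)
    (ht : k * t ≤ (s.length : Int)) :
    ∀ (ds : List (PySem.Dict String Int)) (hlen : ds.length = k.toNat)
      (i : Nat) (hi : i < k.toNat),
      (pvFlatB s k (PySem.List.pyRange 0 (k * t) 1) ds)[i]'(by rw [pvFlatB_length]; omega)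
        = (List.range t).foldl
            (fun d m => pvStepB d (String.ofList [s.getD (i + m * k.toNat) ' ']))
            (ds[i]'(by omega)) := by
  revert ht
  induction t with
  | zero =>
    intro ht ds hlen i hi
    have h0 : PySem.List.pyRange 0 (k * ((0 : Nat) : Int)) 1 = [] :=
      PySem.List.pyRange_one_eq_nil (by simp)
    simp [pvFlatB]
  | succ t ih =>
    intro ht ds hlen i hi
    have ht' : k * ((t : Int) + 1) ≤ (s.length : Int) := by push_cast at ht; exact ht
    have hsplit : k * ((t : Int) + 1) = k * t + k := by ring
    have hkt0 : (0 : Int) ≤ k * t := mul_nonneg hk.le (by positivity)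
    have hlist : pvFlatB s k (PySem.List.pyRange 0 (k * ((t : Nat) + 1 : Nat)) 1) ds
        = pvFlatB s k (PySem.List.pyRange (k * (t : Int) + ((0 : Nat) : Int)) (k * t + k) 1)
            (pvFlatB s k (PySem.List.pyRange 0 (k * t) 1) ds) := by
      rw [show ((((t : Nat) + 1 : Nat) : Int)) = (t : Int) + 1 by push_cast; ring, hsplit,
        PySem.List.pyRange_one_append 0 (k * t) (k * t + k) hkt0 (by omega),
        pvFlatB_append]
      norm_num
    rw [List.getElem_of_eq hlist]
    rw [pvFlatB_round s k hk t ht' 0 (by omega) _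
      (by rw [pvFlatB_length]; exact hlen) i hi]
    rw [List.range_succ, List.foldl_append, List.foldl_cons, List.foldl_nil]
    rw [ih (by omega) ds hlen i hi]
    simp

-- ===== VERDICT (by name: the statement is the Claim_ definition above) =====
theorem get_char_distributions_for_given_key_length_spec : Claim_equal_get_char_distributions_for_given_key_length := by
  intro text k hdom hpre
  rcases hpre with hk | ⟨hneg, -⟩
  case inr =>
    unfold Spec_get_char_distributions_for_given_key_length
    unfold get_char_distributions_for_given_key_length
      get_char_distributions_for_given_key_length_alt
    simp only []
    rw [PySem.List.pyRange_one_eq_nil (by omega : k ≤ 0)]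
    simp [pvFlatB_nil]
  have hkn : ((k.toNat : Int)) = k := Int.toNat_of_nonneg hk.le
  unfold Spec_get_char_distributions_for_given_key_length
  unfold get_char_distributions_for_given_key_length
    get_char_distributions_for_given_key_length_alt
  simp only []
  set s := text.toList with hs
  set c : Int := ((s.length : Int)) / k with hc
  have hc0 : 0 ≤ c := Int.ediv_nonneg (by positivity) hk.le
  have hkc : k * c ≤ (s.length : Int) := by
    have h1 := Int.ediv_add_emod (s.length : Int) k
    have h2 := Int.emod_nonneg (s.length : Int) (ne_of_gt hk)
    linarith
  have hcast : k * c = k * ((c.toNat : Nat) : Int) := by rw [Int.toNat_of_nonneg hc0]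
  apply List.ext_getElem
  · simp [pvFlatB_length]
  · intro i h1 h2
    have hik : i < k.toNat := by
      simpa [PySem.List.length_pyRange_one] using h1
    simp only [List.getElem_map]
    rw [PySem.List.getElem_pyRange_one]
    rw [show (0 : Int) + (i : Int) = (i : Int) by ring]
    rw [pvA_ref s k hk i hik]
    have hfull := pvFlatB_full s k hk c.toNat (by rw [← hcast]; exact hkc)
      ((PySem.List.pyRange 0 k 1).map (fun _ => (PySem.Dict.empty : PySem.Dict String Int)))
      (by simp [PySem.List.length_pyRange_one]) i hik
    rw [List.getElem_of_eq (by rw [hcast]) _, hfull]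
    congr 1
    unfold pvRef
    congr 1
    rw [List.getElem_map]
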